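-- pv_equiv track=rewrite | github.com/TayaInakova/Python_tasks | HW05/Task1.py | create_battlefield
-- ===== SOURCE A (Python) =====
-- def create_battlefield(field_size):
--     new_battlefield = []
--     for n in range(field_size + 1):
--         new_battlefield.append([[]])
--         for m in range(field_size):
--             new_battlefield[n].append([])
--     count = 1
--     for q in range(field_size + 1):
--         for w in range(field_size + 1):
--             if count > field_size:
--                 count = 0
--             if q == field_size:
--                 new_battlefield[q][w] = count
--                 count += 1
--             elif w == 0:
--                 new_battlefield[q][w] = count
--                 count += 1
--             else:
--                 new_battlefield[q][w] = 0
--     return new_battlefield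
-- ===== SOURCE B (Python) =====
-- def create_battlefield(field_size):
--     if field_size < 0:
--         return []
--     body = [[r + 1] + [0] * field_size for r in range(field_size)]
--     last_row = list(range(field_size + 1))
--     return body + [last_row]
-- ===== Notes on version B (the rewrite author's own statement) =====
-- stated objective: simpler
-- what changed: Replaced A's placeholder grid and row-major cycling counter with overflow reset by direct structural construction: the body rows are built by list concatenation [r+1]+[0]*n and the last row is list(range(n+1)), with no per-cell scan or conditionals at all.
import Mathlib
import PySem

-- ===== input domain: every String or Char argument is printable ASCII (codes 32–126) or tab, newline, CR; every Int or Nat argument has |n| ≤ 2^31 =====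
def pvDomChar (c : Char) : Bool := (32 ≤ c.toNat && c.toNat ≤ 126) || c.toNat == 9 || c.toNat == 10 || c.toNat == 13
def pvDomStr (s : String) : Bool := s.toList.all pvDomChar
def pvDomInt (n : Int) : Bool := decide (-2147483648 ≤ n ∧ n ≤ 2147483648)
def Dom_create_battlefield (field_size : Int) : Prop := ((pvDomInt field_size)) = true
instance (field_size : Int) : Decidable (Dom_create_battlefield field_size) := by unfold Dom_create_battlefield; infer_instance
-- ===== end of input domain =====

-- B replaces A's placeholder grid and cycling counter (with overflow reset) by direct structural
-- construction: body rows [r+1]+[0]*n concatenated with the last row list(range(n+1)); objective: simpler.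

-- ===== PORT A =====
-- Python list assignment new_battlefield[q][w] = v (all indices A uses are in range)
def pyAssign (g : List (List Int)) (q w : Nat) (v : Int) : List (List Int) :=
  g.set q ((g.getD q []).set w v)

-- one iteration of A's inner w-loop body; state = (grid, count)
def cbStep (field_size : Int) (M : Nat) (st : List (List Int) × Int) (q w : Nat) : List (List Int) × Int :=
  let count := if st.2 > field_size then 0 else st.2
  if q = M then (pyAssign st.1 q w count, count + 1)
  else if w = 0 then (pyAssign st.1 q w count, count + 1)
  else (pyAssign st.1 q w 0, count)

-- range(k) is ported as List.range k.toNat (empty for k ≤ 0, exactly Python's range);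
-- A's placeholder cells ([[]] / []) are represented by 0: the second double loop
-- overwrites every cell before the function returns.
def create_battlefield (field_size : Int) : List (List Int) :=
  let N := (field_size + 1).toNat
  let M := field_size.toNat
  let init : List (List Int) :=
    (List.range N).foldl
      (fun g _ => g ++ [(List.range M).foldl (fun row _ => row ++ [0]) [0]]) []
  ((List.range N).foldl
    (fun st q => (List.range N).foldl (fun st w => cbStep field_size M st q w) st)
    (init, 1)).1

-- ===== PORT B =====
-- body = [[r+1] + [0]*field_size for r in range(field_size)]; last_row = list(range(field_size+1))
def create_battlefield_alt (field_size : Int) : List (List Int) :=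
  if field_size < 0 then []
  else
    ((List.range field_size.toNat).map
      (fun (r : Nat) => ((r : Int) + 1) :: List.replicate field_size.toNat 0))
    ++ [(List.range (field_size + 1).toNat).map (fun (c : Nat) => (c : Int))]

-- ===== PRECONDITION & SPEC =====
def Spec_create_battlefield (field_size : Int) (out : List (List Int)) : Prop := out = create_battlefield_alt field_size
instance (field_size : Int) (out : List (List Int)) : Decidable (Spec_create_battlefield field_size out) := by unfold Spec_create_battlefield; infer_instance

-- ===== CLAIM (what is proved, stated in full; the proofs are below) =====
def Claim_equal_create_battlefield : Prop := ∀ (field_size : Int), Dom_create_battlefield field_size → Spec_create_battlefield field_size (create_battlefield field_size)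

-- ===== LEMMAS AND PROOFS =====

-- the row A's second double loop produces at index r, for field_size = s ≥ 0
def altRow (s r : Nat) : List Int :=
  if r < s then ((r : Int) + 1) :: List.replicate s 0
  else (List.range (s + 1)).map (fun (c : Nat) => (c : Int))

-- count entering row q of A's second double loop
def entCount (s q : Nat) : Int := if q < s then (q : Int) + 1 else if s = 0 then 1 else 0

lemma foldl_snoc_replicate {α : Type} (x : α) (a : List α) :
    ∀ k, (List.range k).foldl (fun g _ => g ++ [x]) a = a ++ List.replicate k x := by
  intro k
  induction k with
  | zero => simp
  | succ k ih => simp [List.range_succ, ih, List.replicate_succ']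

lemma getElem?_set_self_of_lt {α : Type} (l : List α) (i : Nat) (x : α) (h : i < l.length) :
    (l.set i x)[i]? = some x := by
  simp [h]

lemma nonlast_tail (s q : Nat) (v : Int) (g : List (List Int)) (hq : q ≠ s)
    (hrow : g[q]? = some (v :: List.replicate s 0)) :
    ∀ ws : List Nat, (∀ w ∈ ws, w ≠ 0) → ∀ c : Int,
      ws.foldl (fun st w => cbStep (s : Int) s st q w) (g, c)
        = (g, if ws = [] then c else if c > (s : Int) then 0 else c) := by
  have hset : ∀ x, g[q]? = some x → g.set q x = g := by
    intro x h
    have hi : q < g.length := by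
      by_contra hn
      simp [List.getElem?_eq_none (by omega : g.length ≤ q)] at h
    have hx : g[q] = x := by simpa [List.getElem?_eq_getElem hi] using h
    subst hx
    exact List.set_getElem_self hi
  intro ws
  induction ws with
  | nil => intro _ c; simp
  | cons w ws ih =>
    intro hmem c
    have hw : w ≠ 0 := hmem w (by simp)
    obtain ⟨k, rfl⟩ : ∃ k, w = k + 1 := ⟨w - 1, by omega⟩
    have hgd : g.getD q [] = v :: List.replicate s 0 := by
      simp [List.getD, hrow]
    have hstep : cbStep (s : Int) s (g, c) q (k+1)
        = (g, if c > (s : Int) then 0 else c) := by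
      simp only [cbStep, pyAssign, hgd, if_neg hq]
      simp [List.set_cons_succ, hset _ hrow]
    simp only [List.foldl_cons, hstep]
    rw [ih (fun w hwm => hmem w (by simp [hwm]))]
    have hcons : ((k+1) :: ws : List Nat) ≠ [] := by simp
    rw [if_neg hcons]
    rcases eq_or_ne ws ([] : List Nat) with rfl | hne
    · simp
    · rw [if_neg hne]
      congr 1
      have hs : (0:Int) ≤ (s:Int) := Int.natCast_nonneg s
      split_ifs <;> omega

lemma rows_fold (s : Nat) : ∀ q, q ≤ s →
    (List.range q).foldl
      (fun st q => (List.range (s+1)).foldl (fun st w => cbStep (s : Int) s st q w) st)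
      (List.replicate (s+1) (List.replicate (s+1) 0), 1)
    = ((List.range q).map (altRow s) ++ List.replicate (s+1-q) (List.replicate (s+1) 0),
        entCount s q) := by
  intro q
  induction q with
  | zero =>
    intro _
    simp only [List.range_zero, List.foldl_nil, List.map_nil, List.nil_append, Nat.sub_zero]
    simp only [Prod.mk.injEq, true_and]
    unfold entCount; split_ifs <;> omega
  | succ q ih =>
    intro hq1
    have hqs : q < s := by omega
    rw [show List.range (q+1) = List.range q ++ [q] from List.range_succ,
      List.foldl_append, ih (by omega), List.foldl_cons, List.foldl_nil]
    have hent : entCount s q = (q:Int)+1 := if_pos hqs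
    rw [hent, List.range_succ_eq_map, List.foldl_cons]
    have hGq : ((List.range q).map (altRow s) ++
        List.replicate (s+1-q) (List.replicate (s+1) 0))[q]? = some (List.replicate (s+1) 0) := by
      rw [List.getElem?_append_right (by simp)]
      simp [List.getElem?_replicate]
      omega
    have hstep : cbStep (s:Int) s
        ((List.range q).map (altRow s) ++ List.replicate (s+1-q) (List.replicate (s+1) 0), (q:Int)+1) q 0
        = (((List.range q).map (altRow s) ++
            List.replicate (s+1-q) (List.replicate (s+1) 0)).set q (((q:Int)+1) :: List.replicate s 0),
           (q:Int)+1+1) := by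
      have h1 : ¬ ((s:Int) < (q:Int)+1) := by omega
      have h2 : q ≠ s := by omega
      have hsets : (List.replicate (s+1) (0:Int)).set 0 ((q:Int)+1) = ((q:Int)+1) :: List.replicate s 0 := by
        rw [List.replicate_succ]; rfl
      simp [cbStep, pyAssign, List.getD, hGq, h1, h2, hsets]
    rw [hstep]
    have hlen : q < ((List.range q).map (altRow s) ++
        List.replicate (s+1-q) (List.replicate (s+1) 0)).length := by simp; omega
    have hset : (((List.range q).map (altRow s) ++
        List.replicate (s+1-q) (List.replicate (s+1) 0)).set q (((q:Int)+1) :: List.replicate s 0))[q]?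
        = some (((q:Int)+1) :: List.replicate s 0) := by
      exact getElem?_set_self_of_lt _ _ _ hlen
    rw [nonlast_tail s q ((q:Int)+1) _ (by omega) hset _
      (by rintro w hw; simp at hw; omega) ((q:Int)+1+1)]
    have hne : (List.range s).map Nat.succ ≠ [] := by simp; omega
    rw [if_neg hne]
    simp only [Prod.mk.injEq]
    constructor
    · rw [List.set_append_right _ _ (by simp)]
      simp only [List.length_map, List.length_range, Nat.sub_self]
      rw [show s+1-q = (s-q)+1 from by omega, List.replicate_succ, List.set_cons_zero]
      rw [List.map_append, List.map_singleton]
      have : altRow s q = ((q:Int)+1) :: List.replicate s 0 := by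
        unfold altRow; rw [if_pos hqs]
      simp [this, show s+1-(q+1) = s-q from by omega]
    · unfold entCount
      split_ifs <;> omega

def rowL (s k : Nat) : List Int := (List.range (s+1)).map (fun (c : Nat) => if c < k then (c : Int) else 0)

lemma rowL_one (s : Nat) : rowL s 1 = List.replicate (s+1) (0:Int) := by
  unfold rowL
  apply List.ext_getElem (by simp)
  intro j h1 h2
  simp only [List.getElem_map, List.getElem_range, List.getElem_replicate]
  split_ifs with h
  · simp [Nat.lt_one_iff.mp h]
  · rfl

lemma rowL_set (s k : Nat) : (rowL s k).set k (k : Int) = rowL s (k+1) := by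
  unfold rowL
  apply List.ext_getElem (by simp)
  intro j h1 h2
  rw [List.getElem_set]
  simp only [List.getElem_map, List.getElem_range]
  split_ifs <;> omega

lemma last_aux (s : Nat) (g : List (List Int)) (hlen : g.length = s + 1)
    (hrow : g[s]? = some (List.replicate (s+1) 0)) (c0 : Int) (hc0 : c0 = if s = 0 then 1 else 0) :
    ∀ k, k ≤ s + 1 →
      (List.range k).foldl (fun st w => cbStep (s : Int) s st s w) (g, c0)
        = if k = 0 then (g, c0) else (g.set s (rowL s k), (k : Int)) := by
  have hlg : s < g.length := by omega
  intro k
  induction k with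
  | zero => intro _; simp
  | succ k ih =>
    intro _hk
    rw [show List.range (k+1) = List.range k ++ [k] from List.range_succ,
      List.foldl_append, ih (by omega), List.foldl_cons, List.foldl_nil]
    rcases Nat.eq_zero_or_pos k with rfl | hkpos
    · rcases Nat.eq_zero_or_pos s with rfl | hs
      · rw [show c0 = 1 from by simpa using hc0]
        simp [cbStep, pyAssign, hrow, rowL_one]
      · rw [show c0 = 0 from by rw [hc0, if_neg (by omega)]]
        have hns : ¬ ((s:Int) < 0) := by omega
        simp [cbStep, pyAssign, hrow, rowL_one, hns]
    · rw [if_neg (by omega : ¬ k = 0), if_neg (by omega : ¬ k + 1 = 0)]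
      have hgd : (g.set s (rowL s k)).getD s [] = rowL s k := by
        simp [List.getD, hlg]
      have hcount : (if (k:Int) > (s:Int) then 0 else (k:Int)) = (k:Int) := by
        rw [if_neg (by omega)]
      simp only [cbStep, pyAssign, hcount, hgd, List.set_set]
      rw [rowL_set s k]
      simp [Nat.cast_add]

lemma rowL_top (s : Nat) : rowL s (s+1) = altRow s s := by
  unfold rowL altRow
  rw [if_neg (by omega)]
  apply List.map_congr_left
  intro c hc
  simp only [List.mem_range] at hc
  rw [if_pos (by omega)]

lemma alt_eq_map (s : Nat) : create_battlefield_alt (s : Int) = (List.range (s+1)).map (altRow s) := by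
  unfold create_battlefield_alt
  rw [if_neg (by omega)]
  have hM : ((s:Int)).toNat = s := by omega
  have hN : ((s:Int)+1).toNat = s+1 := by omega
  rw [hM, hN, show (List.range (s+1)).map (altRow s)
      = (List.range s).map (altRow s) ++ [altRow s s] from by
    rw [List.range_succ, List.map_append, List.map_singleton]]
  congr 1
  · apply List.map_congr_left
    intro r hr
    simp only [List.mem_range] at hr
    unfold altRow
    rw [if_pos hr]
  · unfold altRow
    rw [if_neg (by omega)]

lemma main_nonneg (s : Nat) : create_battlefield (s : Int) = create_battlefield_alt (s : Int) := by
  have hN : ((s:Int)+1).toNat = s+1 := by omega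
  have hM : ((s:Int)).toNat = s := by omega
  have hinitrow : (List.range s).foldl (fun row _ => row ++ [(0:Int)]) [0]
      = List.replicate (s+1) 0 := by
    rw [foldl_snoc_replicate, List.replicate_succ]
    rfl
  simp only [create_battlefield, hN, hM, hinitrow, alt_eq_map]
  rw [foldl_snoc_replicate, List.nil_append]
  set f : (List (List Int) × Int) → Nat → (List (List Int) × Int) :=
    fun st q => (List.range (s+1)).foldl (fun st w => cbStep (s:Int) s st q w) st with hf
  rw [show List.range (s+1) = List.range s ++ [s] from List.range_succ,
    List.foldl_append, List.foldl_cons, List.foldl_nil, hf]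
  simp only []
  rw [rows_fold s s le_rfl]
  have hGlen : ((List.range s).map (altRow s)
      ++ List.replicate (s+1-s) (List.replicate (s+1) 0)).length = s + 1 := by
    simp
  have hGrow : ((List.range s).map (altRow s)
      ++ List.replicate (s+1-s) (List.replicate (s+1) 0))[s]? = some (List.replicate (s+1) 0) := by
    rw [List.getElem?_append_right (by simp)]
    simp
  have hc0 : entCount s s = if s = 0 then 1 else 0 := by
    unfold entCount
    rw [if_neg (by omega)]
  rw [last_aux s _ hGlen hGrow _ hc0 (s+1) le_rfl, if_neg (by omega)]
  rw [List.set_append_right _ _ (by simp)]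
  simp only [List.length_map, List.length_range, Nat.sub_self]
  rw [show s+1-s = 1 from by omega, List.replicate_succ, List.replicate_zero, List.set_cons_zero]
  rw [List.map_append, List.map_singleton, rowL_top]

-- ===== VERDICT (by name: the statement is the Claim_ definition above) =====
theorem create_battlefield_spec : Claim_equal_create_battlefield := by
  intro fs _
  unfold Spec_create_battlefield
  rcases le_or_gt 0 fs with h | h
  · obtain ⟨s, rfl⟩ := Int.eq_ofNat_of_zero_le h
    exact main_nonneg s
  · have h1 : (fs + 1).toNat = 0 := by omega
    simp [create_battlefield, create_battlefield_alt, h1, h]
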